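-- pv_equiv track=rewrite | github.com/AvrilMZ/Teoria_de_Algoritmos | Actividades/RPL/2 - Greedy/ej9.py | minimizar_latencia
-- ===== SOURCE A (Python) =====
-- def latencia(finalizacion, deadline):
-- 	return max(0, finalizacion - deadline)
--
-- def minimizar_latencia(L_deadline, T_tareas):
-- 	tareas = list(zip(L_deadline, T_tareas))
-- 	tareas.sort(key=lambda x: x[0])
--
-- 	orden = []
-- 	tiempo_acumulado = 0
-- 	for deadline, duracion in tareas:
-- 		tiempo_acumulado += duracion
-- 		latencia_tarea = latencia(tiempo_acumulado, deadline)
-- 		orden.append((duracion, latencia_tarea))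
--
-- 	return orden
-- ===== SOURCE B (Python) =====
-- def minimizar_latencia(L_deadline, T_tareas):
--     # Selection-based: repeatedly extract the pending task with the smallest
--     # deadline (first occurrence on ties, matching a stable sort) and emit its
--     # (duration, latency) as the running completion time advances.
--     pendientes = list(zip(L_deadline, T_tareas))
--     orden = []
--     acumulado = 0
--     while pendientes:
--         i = 0
--         for j in range(1, len(pendientes)):
--             if pendientes[j][0] < pendientes[i][0]:
--                 i = j
--         deadline, duracion = pendientes.pop(i)
--         acumulado += duracion
--         orden.append((duracion, max(0, acumulado - deadline)))
--     return orden
-- ===== Notes on version B (the rewrite author's own statement) =====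
-- stated objective: alternative
-- what changed: B replaces A's library sort + fused prefix-sum loop with a selection algorithm: it repeatedly scans the pending tasks for the first minimum-deadline one, pops it, and emits its (duration, latency) on the spot, so no sorted list or accumulator-over-a-sorted-list ever exists.
import Mathlib
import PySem

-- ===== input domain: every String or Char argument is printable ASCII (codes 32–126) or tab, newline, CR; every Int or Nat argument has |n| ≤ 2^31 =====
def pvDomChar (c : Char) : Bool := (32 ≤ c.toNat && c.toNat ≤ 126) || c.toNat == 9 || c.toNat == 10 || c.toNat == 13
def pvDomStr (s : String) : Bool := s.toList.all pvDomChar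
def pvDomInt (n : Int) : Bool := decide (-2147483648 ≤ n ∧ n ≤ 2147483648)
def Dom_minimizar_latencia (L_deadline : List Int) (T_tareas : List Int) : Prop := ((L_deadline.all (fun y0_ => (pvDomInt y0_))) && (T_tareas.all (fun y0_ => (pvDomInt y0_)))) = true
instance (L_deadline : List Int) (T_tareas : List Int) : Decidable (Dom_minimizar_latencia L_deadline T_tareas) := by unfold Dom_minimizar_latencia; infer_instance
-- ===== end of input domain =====

-- B replaces A's library sort + fused accumulate loop with a selection algorithm:
-- it repeatedly scans the pending tasks for the first minimum-deadline one, pops it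
-- and emits its (duration, latency) on the spot (alternative decomposition, O(n^2)).


-- ===== PORT A =====
def latencia (finalizacion : Int) (deadline : Int) : Int := max 0 (finalizacion - deadline)

def minimizar_latencia (L_deadline : List Int) (T_tareas : List Int) : List (Int × Int) :=
  let tareas := PySem.List.sorted (List.zip L_deadline T_tareas) (fun x => x.1)
  let st := tareas.foldl
    (fun (st : Int × List (Int × Int)) p =>
      let tiempo_acumulado := st.1 + p.2
      let latencia_tarea := latencia tiempo_acumulado p.1
      (tiempo_acumulado, st.2 ++ [(p.2, latencia_tarea)]))
    (0, [])
  st.2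

-- ===== PORT B =====
-- inner 'for j in range(1, len(pendientes)): if pendientes[j][0] < pendientes[i][0]: i = j'
-- (range(1, n) is ported as List.range' 1 (n-1), exact for every n; list indexing is in range)
def pvMinIdx (ps : List (Int × Int)) : Nat :=
  (List.range' 1 (ps.length - 1)).foldl
    (fun i j => if (ps.getD j (0, 0)).1 < (ps.getD i (0, 0)).1 then j else i) 0

-- the selection fold stays inside the index range (needed for termination of the loop)
theorem pvMinIdx_lt (p : Int × Int) (ps : List (Int × Int)) :
    pvMinIdx (p :: ps) < (p :: ps).length := by
  have gen : ∀ (l : List Nat) (i : Nat), i < (p :: ps).length → (∀ j ∈ l, j < (p :: ps).length) →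
      l.foldl (fun i j => if ((p :: ps).getD j (0, 0)).1 < ((p :: ps).getD i (0, 0)).1 then j else i) i
        < (p :: ps).length := by
    intro l
    induction l with
    | nil => intro i hi _; simpa using hi
    | cons a t ih =>
      intro i hi hl
      simp only [List.foldl_cons]
      split
      · exact ih a (hl a (by simp)) (fun j hj => hl j (by simp [hj]))
      · exact ih i hi (fun j hj => hl j (by simp [hj]))
  refine gen _ 0 (by simp) ?_
  intro j hj
  have := List.mem_range'_1.mp hj
  simp only [List.length_cons] at this ⊢
  omega

-- the while-loop of Source B: extract the first min-deadline pending task, emit, recurse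
def pvSelLoop (pend : List (Int × Int)) (acumulado : Int) : List (Int × Int) :=
  match pend with
  | [] => []
  | p :: ps =>
    let i := pvMinIdx (p :: ps)
    let tarea := (p :: ps).getD i (0, 0)
    let acumulado' := acumulado + tarea.2
    (tarea.2, max 0 (acumulado' - tarea.1)) :: pvSelLoop ((p :: ps).eraseIdx i) acumulado'
termination_by pend.length
decreasing_by
  have hi : pvMinIdx (p :: ps) < ps.length + 1 := by
    simpa using pvMinIdx_lt p ps
  simp [List.length_eraseIdx, hi]

def minimizar_latencia_alt (L_deadline : List Int) (T_tareas : List Int) : List (Int × Int) :=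
  pvSelLoop (List.zip L_deadline T_tareas) 0

-- ===== PRECONDITION & SPEC =====
def Spec_minimizar_latencia (L_deadline : List Int) (T_tareas : List Int) (out : List (Int × Int)) : Prop := out = minimizar_latencia_alt L_deadline T_tareas
instance (L_deadline : List Int) (T_tareas : List Int) (out : List (Int × Int)) : Decidable (Spec_minimizar_latencia L_deadline T_tareas out) := by unfold Spec_minimizar_latencia; infer_instance

-- ===== CLAIM (what is proved, stated in full; the proofs are below) =====
def Claim_equal_minimizar_latencia : Prop := ∀ (L_deadline : List Int) (T_tareas : List Int), Dom_minimizar_latencia L_deadline T_tareas → Spec_minimizar_latencia L_deadline T_tareas (minimizar_latencia L_deadline T_tareas)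

-- ===== LEMMAS AND PROOFS =====
-- the common value both sides compute: emit tasks in list order with a running total
def pvEmit (acc : Int) : List (Int × Int) → List (Int × Int)
  | [] => []
  | p :: ps => (p.2, max 0 (acc + p.2 - p.1)) :: pvEmit (acc + p.2) ps

theorem foldA_eq_emit (xs : List (Int × Int)) (acc : Int) (out : List (Int × Int)) :
    (xs.foldl
      (fun (st : Int × List (Int × Int)) p =>
        (st.1 + p.2, st.2 ++ [(p.2, latencia (st.1 + p.2) p.1)]))
      (acc, out)).2 = out ++ pvEmit acc xs := by
  induction xs generalizing acc out with
  | nil => simp [pvEmit]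
  | cons p ps ih =>
    simp only [List.foldl_cons]
    rw [ih]
    simp [pvEmit, latencia]

theorem insertBy_min (m : Int × Int) (ys : List (Int × Int)) (h : ∀ y ∈ ys, m.1 < y.1) :
    PySem.List.insertBy (fun a b : Int × Int => decide (a.1 < b.1)) m ys = m :: ys := by
  cases ys with
  | nil => rfl
  | cons y t => simp [PySem.List.insertBy, h y (by simp)]

theorem foldl_ins_cons (bs : List (Int × Int)) (m : Int × Int) (acc : List (Int × Int))
    (h : ∀ b ∈ bs, ¬ b.1 < m.1) :
    bs.foldl (fun acc x => PySem.List.insertBy (fun a b : Int × Int => decide (a.1 < b.1)) x acc)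
      (m :: acc)
    = m :: bs.foldl (fun acc x => PySem.List.insertBy (fun a b : Int × Int => decide (a.1 < b.1)) x acc) acc := by
  induction bs generalizing acc with
  | nil => rfl
  | cons b t ih =>
    simp only [List.foldl_cons]
    rw [show PySem.List.insertBy (fun a b : Int × Int => decide (a.1 < b.1)) b (m :: acc)
        = m :: PySem.List.insertBy (fun a b : Int × Int => decide (a.1 < b.1)) b acc by
      simp [PySem.List.insertBy, h b (by simp)]]
    exact ih _ (fun x hx => h x (by simp [hx]))
  
-- pulling the (first) minimum to the front of a stable sort
theorem sorted_min_split (as bs : List (Int × Int)) (m : Int × Int)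
    (h1 : ∀ a ∈ as, m.1 < a.1) (h2 : ∀ b ∈ bs, m.1 ≤ b.1) :
    PySem.List.sorted (as ++ m :: bs) (fun x => x.1) false
      = m :: PySem.List.sorted (as ++ bs) (fun x => x.1) false := by
  rw [PySem.List.sorted_eq_foldl_insertBy, PySem.List.sorted_eq_foldl_insertBy]
  rw [List.foldl_append, List.foldl_append, List.foldl_cons]
  rw [insertBy_min m _ (fun y hy => h1 y (by
    rw [← PySem.List.sorted_eq_foldl_insertBy] at hy
    exact (PySem.List.mem_sorted as (fun x => x.1) false y).mp hy))]
  exact foldl_ins_cons bs m _ (fun b hb => not_lt.mpr (h2 b hb))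

-- one unfolding step of the selection loop on a nonempty pending list
theorem pvSelLoop_cons (p : Int × Int) (ps : List (Int × Int)) (acc : Int) :
    pvSelLoop (p :: ps) acc =
      (((p :: ps).getD (pvMinIdx (p :: ps)) (0, 0)).2,
        max 0 (acc + ((p :: ps).getD (pvMinIdx (p :: ps)) (0, 0)).2
          - ((p :: ps).getD (pvMinIdx (p :: ps)) (0, 0)).1)) ::
      pvSelLoop ((p :: ps).eraseIdx (pvMinIdx (p :: ps)))
        (acc + ((p :: ps).getD (pvMinIdx (p :: ps)) (0, 0)).2) := by
  rw [pvSelLoop.eq_def]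

-- the selection fold computes a (first-occurrence) minimal index
theorem pvMinIdx_spec (p : Int × Int) (ps : List (Int × Int)) :
    pvMinIdx (p :: ps) < (p :: ps).length ∧
    (∀ k < (p :: ps).length,
      ((p :: ps).getD (pvMinIdx (p :: ps)) (0, 0)).1 ≤ ((p :: ps).getD k (0, 0)).1) ∧
    (∀ k < pvMinIdx (p :: ps),
      ((p :: ps).getD (pvMinIdx (p :: ps)) (0, 0)).1 < ((p :: ps).getD k (0, 0)).1) := by
  set xs := p :: ps with hxs
  set g := fun k => (xs.getD k ((0 : Int), (0 : Int))).1 with hg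
  have gen : ∀ (len j i : Nat), j + len ≤ xs.length → i < xs.length →
      (∀ k < j, g i ≤ g k) → (∀ k < i, g i < g k) →
      (let r := (List.range' j len).foldl (fun i j => if g j < g i then j else i) i
       r < xs.length ∧ (∀ k < j + len, g r ≤ g k) ∧ (∀ k < r, g r < g k)) := by
    intro len
    induction len with
    | zero =>
      intro j i hjn hi hle hlt
      exact ⟨hi, fun k hk => hle k (by omega), hlt⟩
    | succ l ih =>
      intro j i hjn hi hle hlt
      simp only [List.range'_succ, List.foldl_cons]
      by_cases hcond : g j < g i
      · have := ih (j + 1) j (by omega) (by omega)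
          (fun k hk => by
            rcases Nat.lt_succ_iff_lt_or_eq.mp hk with h | h
            · exact le_of_lt (lt_of_lt_of_le hcond (hle k h))
            · simp [h])
          (fun k hk => lt_of_lt_of_le hcond (hle k hk))
        simpa [hcond, Nat.add_assoc, Nat.add_comm 1 l] using this
      · have := ih (j + 1) i (by omega) hi
          (fun k hk => by
            rcases Nat.lt_succ_iff_lt_or_eq.mp hk with h | h
            · exact hle k h
            · subst h; exact not_lt.mp hcond)
          hlt
        simpa [hcond, Nat.add_assoc, Nat.add_comm 1 l] using this
  have h0 : (0 : Nat) < xs.length := by simp [hxs]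
  have res := gen (xs.length - 1) 1 0 (by omega) h0
    (fun k hk => by interval_cases k; exact le_refl _)
    (fun k hk => by omega)
  have hrw : pvMinIdx xs = (List.range' 1 (xs.length - 1)).foldl (fun i j => if g j < g i then j else i) 0 := rfl
  rw [hrw]
  have hlen : 1 + (xs.length - 1) = xs.length := by omega
  simpa [hlen] using res

-- selection-with-emission equals emitting over the stable sort
theorem selLoop_eq_emit : ∀ (n : Nat) (pend : List (Int × Int)) (acc : Int),
    pend.length = n →
    pvSelLoop pend acc = pvEmit acc (PySem.List.sorted pend (fun x => x.1) false) := by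
  intro n
  induction n using Nat.strong_induction_on with
  | _ n ih =>
    intro pend acc hlen
    cases pend with
    | nil =>
      rw [pvSelLoop.eq_def]
      simp [PySem.List.sorted, pvEmit]
    | cons p ps =>
      obtain ⟨hr, hmin, hfirst⟩ := pvMinIdx_spec p ps
      have hstep := pvSelLoop_cons p ps acc
      set xs := p :: ps with hxs
      set r := pvMinIdx xs with hrdef
      have hrl : r < xs.length := hr
      have hget : xs.getD r (0, 0) = xs[r] := List.getD_eq_getElem xs (0,0) hrl
      -- split xs around index r
      have hsplit : xs = xs.take r ++ xs[r] :: xs.drop (r + 1) := by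
        conv_lhs => rw [← List.take_append_drop r xs]
        rw [List.drop_eq_getElem_cons hrl]
      have herase : xs.eraseIdx r = xs.take r ++ xs.drop (r + 1) :=
        List.eraseIdx_eq_take_drop_succ xs r
      have h1 : ∀ a ∈ xs.take r, (xs[r]).1 < a.1 := by
        intro a ha
        obtain ⟨k, hk, hka⟩ := List.mem_iff_getElem.mp ha
        have hkr : k < r := by
          rw [List.length_take] at hk
          omega
        have : xs[r].1 < xs[k].1 := by
          have := hfirst k hkr
          rwa [hget, List.getD_eq_getElem xs (0,0) (by omega)] at this
        rw [← hka]
        simpa [List.getElem_take] using this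
      have h2 : ∀ b ∈ xs.drop (r + 1), (xs[r]).1 ≤ b.1 := by
        intro b hb
        obtain ⟨k, hk, hkb⟩ := List.mem_iff_getElem.mp hb
        have hkl : r + 1 + k < xs.length := by
          rw [List.length_drop] at hk
          omega
        have : xs[r].1 ≤ xs[r + 1 + k].1 := by
          have := hmin (r + 1 + k) hkl
          rwa [hget, List.getD_eq_getElem xs (0,0) hkl] at this
        rw [← hkb]
        simpa [List.getElem_drop] using this
      have hsort : PySem.List.sorted xs (fun x => x.1) false
          = xs[r] :: PySem.List.sorted (xs.eraseIdx r) (fun x => x.1) false := by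
        rw [herase]
        conv_lhs => rw [hsplit]
        exact sorted_min_split _ _ _ h1 h2
      have hlt : (xs.eraseIdx r).length < n := by
        rw [List.length_eraseIdx_of_lt hrl]
        simp only [← hlen]
        omega
      rw [hstep, hget, hsort]
      simp only [pvEmit]
      exact congrArg _ (ih _ hlt _ _ rfl)

-- ===== VERDICT (by name: the statement is the Claim_ definition above) =====
theorem minimizar_latencia_spec : Claim_equal_minimizar_latencia := by
  intro L T _
  show _ = _
  unfold minimizar_latencia minimizar_latencia_alt
  rw [selLoop_eq_emit (List.zip L T).length _ 0 rfl]
  exact foldA_eq_emit _ 0 []
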